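-- pv_equiv track=rewrite | github.com/pritomrajkhowa/WEB_VfPbP | wolfformSolution.py | mapingTable
-- ===== SOURCE A (Python) =====
-- def mapingTable(listofSymbol,Var,alter_map):
--     new_equation=[]
--     count = 0
--     list_of_symbol = ['A','B','C','D','E','F','G','H','I','J','K','L','M','N','O','P','Q','R','S','T','U','V','W','Y','Z']
--     for element in listofSymbol:
--         if element==Var:
--
--            new_equation.append('X')
--            alter_map[element]='X'
--
--         elif element not in ['+','*','^','/','%','-','=','>','<','(',')'] and element!=Var and element.isdigit()==False:
--
--            if element in alter_map.keys():
--
--               new_equation.append(alter_map[element])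
--
--            else:
--
--               alter_map[element]=list_of_symbol[count]
--               new_equation.append(list_of_symbol[count])
--               count=count+1
--         else:
--               new_equation.append(element)
--     return new_equation
-- ===== SOURCE B (Python) =====
-- def mapingTable(listofSymbol, Var, alter_map):
--     # Two phases: first build the symbol table (mutating alter_map like the original),
--     # then render the whole equation from the finished table.
--     ops = ['+', '*', '^', '/', '%', '-', '=', '>', '<', '(', ')']
--     letters = ['A','B','C','D','E','F','G','H','I','J','K','L','M','N',
--                'O','P','Q','R','S','T','U','V','W','Y','Z']
--     count = 0
--     for e in listofSymbol:
--         if e == Var: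
--             alter_map[e] = 'X'
--         elif e not in ops and e.isdigit() == False and e not in alter_map:
--             alter_map[e] = letters[count]
--             count = count + 1
--     return ['X' if e == Var
--             else e if (e in ops or e.isdigit())
--             else alter_map[e]
--             for e in listofSymbol]
-- ===== Notes on version B (the rewrite author's own statement) =====
-- stated objective: alternative
-- what changed: A interleaves table construction and output construction in one loop with a count/append state; B first builds the complete symbol table in one pass and then renders the whole equation from the finished table in a second pass (a comprehension), relying on the fact that a key's mapping never changes once assigned.
import Mathlib
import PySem

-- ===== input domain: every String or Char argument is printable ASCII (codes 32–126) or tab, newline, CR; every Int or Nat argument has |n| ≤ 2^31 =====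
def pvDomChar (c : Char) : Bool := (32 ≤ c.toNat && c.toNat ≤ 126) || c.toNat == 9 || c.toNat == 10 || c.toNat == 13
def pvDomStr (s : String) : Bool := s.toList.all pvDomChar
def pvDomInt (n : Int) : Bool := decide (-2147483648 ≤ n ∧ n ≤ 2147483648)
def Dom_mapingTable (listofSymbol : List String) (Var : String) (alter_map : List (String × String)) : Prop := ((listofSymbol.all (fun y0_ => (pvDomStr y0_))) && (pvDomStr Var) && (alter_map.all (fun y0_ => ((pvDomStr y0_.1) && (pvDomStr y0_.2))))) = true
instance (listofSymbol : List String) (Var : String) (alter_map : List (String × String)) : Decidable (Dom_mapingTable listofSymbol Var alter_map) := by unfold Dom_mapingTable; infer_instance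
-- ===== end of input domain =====

-- B replaces A's single interleaved loop by two phases: build the table, then render from it.
-- Like A, the Python B mutates alter_map in place (identically to A); the claim is about the return value.

-- the operator list and the canonical-letter list of the Python source (note: no 'X')
def pvOps : List String := ["+", "*", "^", "/", "%", "-", "=", ">", "<", "(", ")"]
def pvLetters : List String := ["A","B","C","D","E","F","G","H","I","J","K","L","M","N","O","P","Q","R","S","T","U","V","W","Y","Z"]

-- ===== PORT A =====
-- loop body of A: state = (new_equation, count, alter_map).  Out-of-range list_of_symbol[count]
-- is an IndexError in Python; those inputs are excluded by Pre_mapingTable (getD "" is never reached inside Pre_).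
def pvStepA (Var : String) (st : List String × Nat × PySem.Dict String String) (element : String) : List String × Nat × PySem.Dict String String :=
  if element = Var then
    (st.1 ++ ["X"], st.2.1, st.2.2.insert element "X")
  else if element ∉ pvOps ∧ element ≠ Var ∧ PySem.Str.strIsdigit element = false then
    match st.2.2.get? element with
    | some v => (st.1 ++ [v], st.2.1, st.2.2)
    | none => (st.1 ++ [pvLetters.getD st.2.1 ""], st.2.1 + 1, st.2.2.insert element (pvLetters.getD st.2.1 ""))
  else
    (st.1 ++ [element], st.2.1, st.2.2)

def mapingTable (listofSymbol : List String) (Var : String) (alter_map : List (String × String)) : List String :=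
  (listofSymbol.foldl (pvStepA Var) ([], 0, PySem.Dict.ofList alter_map)).1

-- ===== PORT B =====
-- phase 1 body: state = (alter_map, count); same IndexError region, excluded by Pre_mapingTable
def pvStepB (Var : String) (st : PySem.Dict String String × Nat) (e : String) : PySem.Dict String String × Nat :=
  if e = Var then
    (st.1.insert e "X", st.2)
  else if e ∉ pvOps ∧ PySem.Str.strIsdigit e = false ∧ st.1.contains e = false then
    (st.1.insert e (pvLetters.getD st.2 ""), st.2 + 1)
  else
    st

-- phase 2: render one element from the finished table (alter_map[e]: the key is always present)
def pvRender (Var : String) (table : PySem.Dict String String) (e : String) : String :=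
  if e = Var then "X"
  else if e ∈ pvOps ∨ PySem.Str.strIsdigit e then e
  else table.getD e ""

def mapingTable_alt (listofSymbol : List String) (Var : String) (alter_map : List (String × String)) : List String :=
  let table := (listofSymbol.foldl (pvStepB Var) (PySem.Dict.ofList alter_map, 0)).1
  listofSymbol.map (pvRender Var table)

-- ===== PRECONDITION & SPEC =====
-- Pre_ excludes exactly the inputs on which Python A raises IndexError: more than 25 distinct
-- fresh symbols (non-operator, non-digit, ≠ Var, not already a key of alter_map).
def Pre_mapingTable (listofSymbol : List String) (Var : String) (alter_map : List (String × String)) : Prop :=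
  ((listofSymbol.filter (fun e => decide (e ∉ pvOps) && decide (e ≠ Var) && !(PySem.Str.strIsdigit e) && !((PySem.Dict.ofList alter_map).contains e))).dedup).length ≤ 25
instance (listofSymbol : List String) (Var : String) (alter_map : List (String × String)) : Decidable (Pre_mapingTable listofSymbol Var alter_map) := by unfold Pre_mapingTable; infer_instance

def pvWitness_mapingTable : List String × String × (List (String × String)) := (["a", "+", "b", "a", "x", "7"], "x", [("a", "Q")])

def Spec_mapingTable (listofSymbol : List String) (Var : String) (alter_map : List (String × String)) (out : List String) : Prop := out = mapingTable_alt listofSymbol Var alter_map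
instance (listofSymbol : List String) (Var : String) (alter_map : List (String × String)) (out : List String) : Decidable (Spec_mapingTable listofSymbol Var alter_map out) := by unfold Spec_mapingTable; infer_instance

-- ===== CLAIM (what is proved, stated in full; the proofs are below) =====
def Claim_equal_mapingTable : Prop := ∀ (listofSymbol : List String) (Var : String) (alter_map : List (String × String)), Dom_mapingTable listofSymbol Var alter_map → Pre_mapingTable listofSymbol Var alter_map → Spec_mapingTable listofSymbol Var alter_map (mapingTable listofSymbol Var alter_map)

-- ===== LEMMAS AND PROOFS =====

-- once a key ≠ Var is in the table, phase 1 never changes its value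
lemma pvStepB_preserves (Var e : String) (v : String) (he : e ≠ Var) :
    ∀ (l : List String) (d : PySem.Dict String String) (c : Nat),
      d.get? e = some v → ((l.foldl (pvStepB Var) (d, c)).1.get? e = some v) := by
  intro l
  induction l with
  | nil => intro d c h; simpa using h
  | cons x l ih =>
    intro d c h
    simp only [List.foldl_cons]
    unfold pvStepB
    split_ifs with h1 h2
    · subst h1
      exact ih _ _ (by rw [PySem.Dict.get?_insert_of_ne _ _ he]; exact h)
    · have hx : e ≠ x := by
        intro hex; subst hex
        rw [PySem.Dict.contains_eq_isSome_get?, h] at h2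
        simp at h2
      exact ih _ _ (by rw [PySem.Dict.get?_insert_of_ne _ _ hx]; exact h)
    · exact ih _ _ h

-- A's interleaved loop = B's table-building loop followed by rendering from the final table
lemma pvLoop_eq (Var : String) :
    ∀ (l : List String) (acc : List String) (c : Nat) (d : PySem.Dict String String),
      l.foldl (pvStepA Var) (acc, c, d)
        = (acc ++ l.map (pvRender Var (l.foldl (pvStepB Var) (d, c)).1),
           (l.foldl (pvStepB Var) (d, c)).2,
           (l.foldl (pvStepB Var) (d, c)).1) := by
  intro l
  induction l with
  | nil => intro acc c d; simp
  | cons e l ih =>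
    intro acc c d
    simp only [List.foldl_cons, List.map_cons]
    by_cases hv : e = Var
    · -- Var branch
      have hA : pvStepA Var (acc, c, d) e = (acc ++ ["X"], c, d.insert e "X") := by
        simp [pvStepA, hv]
      have hB : pvStepB Var (d, c) e = (d.insert e "X", c) := by
        simp [pvStepB, hv]
      rw [hA, hB, ih]
      have hr : pvRender Var (l.foldl (pvStepB Var) (d.insert e "X", c)).1 e = "X" := by
        simp [pvRender, hv]
      simp [hr]
    · by_cases hmain : e ∉ pvOps ∧ PySem.Chars.strIsdigit e.toList = false
      · -- mapped-symbol branch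
        rcases hmain with ⟨hop, hdig⟩
        -- case on whether e is already a key of d
        cases hd : d.get? e with
        | some v =>
          have hc : d.contains e = true := by
            rw [PySem.Dict.contains_eq_isSome_get?, hd]; rfl
          have hA : pvStepA Var (acc, c, d) e = (acc ++ [v], c, d) := by
            simp [pvStepA, hv, hop, hdig, hd]
          have hB : pvStepB Var (d, c) e = (d, c) := by
            simp [pvStepB, hv, hop, hdig, hc]
          rw [hA, hB, ih]
          have hr : pvRender Var (l.foldl (pvStepB Var) (d, c)).1 e = v := by
            have := pvStepB_preserves Var e v hv l d c hd
            simp [pvRender, hv, hop, hdig, PySem.Dict.getD_eq_get?_getD, this]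
          simp [hr]
        | none =>
          have hc : d.contains e = false := by
            rw [PySem.Dict.contains_eq_isSome_get?, hd]; rfl
          generalize hw : pvLetters.getD c "" = w
          rw [List.getD_eq_getElem?_getD] at hw
          have hA : pvStepA Var (acc, c, d) e = (acc ++ [w], c + 1, d.insert e w) := by
            simp [pvStepA, hv, hop, hdig, hd, hw]
          have hB : pvStepB Var (d, c) e = (d.insert e w, c + 1) := by
            simp [pvStepB, hv, hop, hdig, hc, hw]
          rw [hA, hB, ih]
          have hr : pvRender Var (l.foldl (pvStepB Var) (d.insert e w, c + 1)).1 e = w := by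
            have hin : (d.insert e w).get? e = some w := PySem.Dict.get?_insert_self _ _ _
            have hpres := pvStepB_preserves Var e w hv l _ (c + 1) hin
            simp [pvRender, hv, hop, hdig, PySem.Dict.getD_eq_get?_getD, hpres]
          simp [hr]
      · -- pass-through branch: e ∈ pvOps or e is a digit string
        have hpass : e ∈ pvOps ∨ PySem.Chars.strIsdigit e.toList = true := by
          by_cases h1 : e ∈ pvOps
          · exact Or.inl h1
          · right
            by_cases h2 : PySem.Chars.strIsdigit e.toList = true
            · exact h2
            · exact absurd ⟨h1, by simpa using h2⟩ hmain
        have hA : pvStepA Var (acc, c, d) e = (acc ++ [e], c, d) := by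
          rcases hpass with h | h
          · simp [pvStepA, hv, h]
          · simp [pvStepA, hv, h]
        have hB : pvStepB Var (d, c) e = (d, c) := by
          rcases hpass with h | h
          · simp [pvStepB, hv, h]
          · simp [pvStepB, hv, h]
        rw [hA, hB, ih]
        have hr : pvRender Var (l.foldl (pvStepB Var) (d, c)).1 e = e := by
          simp [pvRender, hv, hpass]
        simp [hr]

-- ===== VERDICT (by name: the statement is the Claim_ definition above) =====
theorem mapingTable_spec : Claim_equal_mapingTable := by
  intro l Var am _ _
  unfold Spec_mapingTable mapingTable mapingTable_alt
  rw [pvLoop_eq]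
  simp
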